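-- pv_equiv track=rewrite | github.com/diabolo-dan/advent-of-code | 2023/day-11.py | expand_lines
-- ===== SOURCE A (Python) =====
-- from collections.abc import Iterator
--
-- def expand_one_way(lines: Iterator[str]) -> Iterator[str]:
--     for line in lines:
--         if '#' not in line:
--             yield line
--         yield line
--
-- def expand_lines(lines: list[str]) -> list[str]:
--     return [''.join(l) for l in
--             expand_one_way(
--                 zip(
--                     *expand_one_way(
--                         zip(*lines)
--                     )
--                 )
--             )
--     ]
-- ===== SOURCE B (Python) =====
-- def expand_lines(lines: list[str]) -> list[str]:
--     # Mark the empty columns once, then build each expanded row directly,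
--     # doubling characters in empty columns and repeating rows with no galaxy.
--     cols = list(zip(*lines))
--     if not cols:
--         return []
--     empty = ['#' not in col for col in cols]
--     out = []
--     for row in lines:
--         s = ''.join(c + c if e else c for c, e in zip(row, empty))
--         out.append(s)
--         if '#' not in s:
--             out.append(s)
--     return out
-- ===== Notes on version B (the rewrite author's own statement) =====
-- stated objective: simpler
-- what changed: One transpose to a boolean empty-column table plus a single direct pass that doubles characters in empty columns and repeats galaxy-free rows, instead of A's duplicate-columns / transpose-back / duplicate-rows generator pipeline.
import Mathlib
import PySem

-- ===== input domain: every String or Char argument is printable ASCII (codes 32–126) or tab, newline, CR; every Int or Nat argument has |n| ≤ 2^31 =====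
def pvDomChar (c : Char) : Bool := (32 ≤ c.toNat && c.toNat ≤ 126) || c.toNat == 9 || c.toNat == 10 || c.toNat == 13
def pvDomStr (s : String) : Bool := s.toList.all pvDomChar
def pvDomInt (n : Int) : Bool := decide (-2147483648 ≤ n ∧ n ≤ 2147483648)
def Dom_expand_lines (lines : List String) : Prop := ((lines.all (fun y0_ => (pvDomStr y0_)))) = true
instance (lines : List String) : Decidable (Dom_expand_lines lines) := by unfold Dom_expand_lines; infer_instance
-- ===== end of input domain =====

-- B replaces A's duplicate-columns/transpose-back/duplicate-rows generator pipeline with one transpose to an empty-column table and a single direct pass per row (simpler decomposition, same cost).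


-- ===== PORT A =====
-- expand_one_way: yields the line twice when it contains no '#'
def pyExpandOneWay (xs : List (List Char)) : List (List Char) :=
  xs.flatMap (fun l => if '#' ∈ l then [l] else [l, l])

-- zip(*rows): transpose truncated to the shortest row; fuel = first row's length bounds the depth
def pyZipAux : Nat → List (List Char) → List (List Char)
  | 0, _ => []
  | Nat.succ fuel, rows =>
    if rows.isEmpty ∨ rows.any List.isEmpty then []
    else (rows.map (fun r => r.getD 0 ' ')) :: pyZipAux fuel (rows.map (List.drop 1))

def pyZip (rows : List (List Char)) : List (List Char) :=
  pyZipAux (match rows with | [] => 0 | r :: _ => r.length) rows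

def expand_lines (lines : List String) : List String :=
  (pyExpandOneWay (pyZip (pyExpandOneWay (pyZip (lines.map String.toList))))).map
    (fun l => String.mk l)

-- ===== PORT B =====
-- ''.join(c + c if e else c for c, e in zip(row, empty))
def bExpandRow (r : List Char) (empty : List Bool) : List Char :=
  (r.zip empty).flatMap (fun ce => if ce.2 then [ce.1, ce.1] else [ce.1])

def expand_lines_alt (lines : List String) : List String :=
  let cols := pyZip (lines.map String.toList)
  if cols.isEmpty then []
  else
    let empty := cols.map (fun c => decide ('#' ∉ c))
    (lines.map String.toList).foldr (fun r acc =>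
      let t := bExpandRow r empty
      let s := String.mk t
      if '#' ∈ t then s :: acc else s :: s :: acc) []

-- ===== PRECONDITION & SPEC =====
def Spec_expand_lines (lines : List String) (out : List String) : Prop := out = expand_lines_alt lines
instance (lines : List String) (out : List String) : Decidable (Spec_expand_lines lines out) := by unfold Spec_expand_lines; infer_instance

-- ===== CLAIM (what is proved, stated in full; the proofs are below) =====
def Claim_equal_expand_lines : Prop := ∀ (lines : List String), Dom_expand_lines lines → Spec_expand_lines lines (expand_lines lines)

-- ===== LEMMAS AND PROOFS =====

-- minimum row length, recursively
def mlen : List (List Char) → Nat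
  | [] => 0
  | [r] => r.length
  | r :: rs => min r.length (mlen rs)

theorem mlen_le (rows : List (List Char)) (r : List Char) (h : r ∈ rows) : mlen rows ≤ r.length := by
  induction rows with
  | nil => simp at h
  | cons a l ih =>
    cases l with
    | nil => simp at h; simp [mlen, h]
    | cons b u =>
      rcases List.mem_cons.mp h with rfl | h2
      · simp [mlen]
      · have := ih h2
        simp only [mlen]
        omega

theorem mlen_drop (rows : List (List Char)) :
    mlen (rows.map (List.drop 1)) = mlen rows - 1 := by
  induction rows with
  | nil => simp [mlen]
  | cons a l ih =>
    cases l with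
    | nil => simp [mlen]
    | cons b u =>
      simp only [List.map_cons, mlen, List.length_drop] at *
      omega

theorem mlen_const (rows : List (List Char)) (m : Nat) (hne : rows ≠ [])
    (h : ∀ r ∈ rows, r.length = m) : mlen rows = m := by
  induction rows with
  | nil => simp at hne
  | cons a l ih =>
    cases l with
    | nil => simpa [mlen] using h a (by simp)
    | cons b u =>
      have ha := h a (by simp)
      have := ih (by simp) (fun r hr => h r (List.mem_cons_of_mem _ hr))
      simp only [mlen] at *
      omega

theorem mlen_pos (rows : List (List Char)) (hne : rows ≠ [])
    (h : ∀ r ∈ rows, r ≠ []) : 1 ≤ mlen rows := by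
  induction rows with
  | nil => simp at hne
  | cons a l ih =>
    have ha : a ≠ [] := h a (by simp)
    have ha' : 1 ≤ a.length := by cases a <;> simp_all
    cases l with
    | nil => simpa [mlen] using ha'
    | cons b u =>
      have := ih (by simp) (fun r hr => h r (List.mem_cons_of_mem _ hr))
      simp only [mlen]
      omega

-- characterization of pyZipAux
theorem pyZipAux_eq (fuel : Nat) (rows : List (List Char)) (hf : mlen rows ≤ fuel) :
    pyZipAux fuel rows =
      (List.range (mlen rows)).map (fun i => rows.map (fun r => r.getD i ' ')) := by
  induction fuel generalizing rows with
  | zero =>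
    have hm : mlen rows = 0 := Nat.le_zero.mp hf
    simp [pyZipAux, hm]
  | succ fuel ih =>
    simp only [pyZipAux]
    by_cases hemp : rows.isEmpty ∨ rows.any List.isEmpty
    · rw [if_pos hemp]
      have hm : mlen rows = 0 := by
        rcases hemp with h1 | h2
        · rw [List.isEmpty_iff] at h1
          simp [h1, mlen]
        · obtain ⟨r, hr, hre⟩ := List.any_eq_true.mp h2
          have hle := mlen_le rows r hr
          rw [List.isEmpty_iff] at hre
          simp [hre] at hle
          omega
      simp [hm]
    · rw [if_neg hemp]
      rw [not_or] at hemp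
      obtain ⟨h1, h2⟩ := hemp
      have hne : rows ≠ [] := by
        intro hr; apply h1; simp [hr]
      have hall : ∀ r ∈ rows, r ≠ [] := by
        intro r hr hre
        apply h2
        exact List.any_eq_true.mpr ⟨r, hr, by simp [hre]⟩
      have hpos := mlen_pos rows hne hall
      have hmd := mlen_drop rows
      rw [ih (rows.map (List.drop 1)) (by omega), hmd]
      obtain ⟨k, hk⟩ : ∃ k, mlen rows = k + 1 := ⟨mlen rows - 1, by omega⟩
      rw [hk]
      simp only [Nat.add_sub_cancel, List.range_succ_eq_map, List.map_cons, List.map_map]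
      congr 1
      apply List.map_congr_left
      intro i _
      apply List.map_congr_left
      intro r _
      show (r.drop 1).getD i ' ' = r.getD (i + 1) ' '
      simp [List.getD_eq_getElem?_getD]

theorem pyZip_eq (rows : List (List Char)) :
    pyZip rows = (List.range (mlen rows)).map (fun i => rows.map (fun r => r.getD i ' ')) := by
  apply pyZipAux_eq
  cases rows with
  | nil => simp [mlen]
  | cons r u => exact mlen_le _ r (by simp)

-- zip truncates its first argument to the second's length
theorem zip_truncate (r : List Char) (e : List Bool) :
    r.zip e = (r.take e.length).zip e := by
  induction r generalizing e with
  | nil => simp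
  | cons c t ih =>
    cases e with
    | nil => simp
    | cons b eb => simp [List.zip_cons_cons, ih eb]

-- B's foldr step unfolds to a flatMap
theorem foldr_step (l : List (List Char)) (e : List Bool) :
    l.foldr (fun r acc =>
      let t := bExpandRow r e
      let s := String.mk t
      if '#' ∈ t then s :: acc else s :: s :: acc) [] =
    l.flatMap (fun r => if '#' ∈ bExpandRow r e then [String.mk (bExpandRow r e)]
                        else [String.mk (bExpandRow r e), String.mk (bExpandRow r e)]) := by
  induction l with
  | nil => simp
  | cons a t ih => simp only [List.foldr_cons, List.flatMap_cons, ih]; split <;> simp_all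

-- flatMap over range of indices equals flatMap over the list itself
theorem flatMap_range_index {α β : Type} (l : List α) (F : Nat → List β) (G : α → List β)
    (h : ∀ j (hj : j < l.length), F j = G l[j]) :
    (List.range l.length).flatMap F = l.flatMap G := by
  induction l generalizing F with
  | nil => simp
  | cons a t ih =>
    rw [List.length_cons, List.range_succ_eq_map, List.flatMap_cons, List.flatMap_map,
      List.flatMap_cons]
    congr 1
    · exact h 0 (by simp)
    · exact ih (fun j => F (j + 1)) (fun j hj => h (j + 1) (by simpa using hj))

-- bExpandRow written with indices (equal-length case via zip truncation)
theorem bExpandRow_index (r : List Char) (e : List Bool) (h : e.length ≤ r.length) :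
    bExpandRow r e = (List.range e.length).flatMap
      (fun i => if e.getD i true then [r.getD i ' ', r.getD i ' '] else [r.getD i ' ']) := by
  rw [bExpandRow, zip_truncate]
  have hlt : (r.take e.length).length = e.length := by
    rw [List.length_take]; omega
  have key : ∀ (r' : List Char) (e' : List Bool), r'.length = e'.length →
      (r'.zip e').flatMap (fun ce => if ce.2 then [ce.1, ce.1] else [ce.1]) =
      (List.range e'.length).flatMap
        (fun i => if e'.getD i true then [r'.getD i ' ', r'.getD i ' '] else [r'.getD i ' ']) := by
    intro r' e' hh
    induction r' generalizing e' with
    | nil => cases e' with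
      | nil => simp
      | cons b eb => simp at hh
    | cons c t ih =>
      cases e' with
      | nil => simp at hh
      | cons b eb =>
        rw [List.length_cons, List.range_succ_eq_map]
        simp only [List.zip_cons_cons, List.flatMap_cons, List.flatMap_map]
        rw [ih eb (by simpa using hh)]
        simp
  rw [key _ _ hlt]
  apply List.flatMap_congr
  intro i hi
  have hik : i < e.length := List.mem_range.mp hi
  have e2 : (r.take e.length).getD i ' ' = r.getD i ' ' := by
    simp [List.getD_eq_getElem?_getD, hik]
  rw [e2]

-- per-row agreement: A's expanded row j equals B's expansion of row j with the column table
theorem row_agree (lines : List String) (k : Nat)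
    (hn : mlen (lines.map String.toList) = k + 1) (j : Nat)
    (hj : j < lines.length) :
    (pyExpandOneWay (pyZip (lines.map String.toList))).map (fun c => c.getD j ' ') =
      bExpandRow lines[j].toList
        ((pyZip (lines.map String.toList)).map (fun c => decide ('#' ∉ c))) := by
  have hC := pyZip_eq (lines.map String.toList)
  rw [hn] at hC
  have hlej : k + 1 ≤ lines[j].toList.length := by
    have h1 := mlen_le (lines.map String.toList) lines[j].toList
      (List.mem_map.mpr ⟨lines[j], List.getElem_mem hj, rfl⟩)
    rw [hn] at h1
    exact h1
  rw [hC, pyExpandOneWay, List.map_flatMap, List.flatMap_map, List.map_map]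
  have hel : ((List.range (k + 1)).map
      ((fun c => decide ('#' ∉ c)) ∘ fun i => (lines.map String.toList).map (fun r => r.getD i ' '))).length = k + 1 := by
    simp
  rw [bExpandRow_index _ _ (by rw [hel]; exact hlej), hel]
  apply List.flatMap_congr
  intro i hi
  have hik : i < k + 1 := List.mem_range.mp hi
  have e1 : ((lines.map String.toList).map (fun r => r.getD i ' ')).getD j ' '
      = lines[j].toList.getD i ' ' := by
    simp [List.getD_eq_getElem?_getD, List.getElem?_eq_getElem hj]
  have e3 : ((List.range (k + 1)).map
      ((fun c => decide ('#' ∉ c)) ∘ fun i => (lines.map String.toList).map (fun r => r.getD i ' '))).getD i true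
      = decide ('#' ∉ (lines.map String.toList).map (fun r => r.getD i ' ')) := by
    simp only [List.getD_eq_getElem?_getD, List.getElem?_map, List.getElem?_range hik,
      Option.map_some, Option.getD_some, Function.comp_apply]
  by_cases hP : '#' ∈ (lines.map String.toList).map (fun r => r.getD i ' ')
  · rw [if_pos hP, if_neg (by rw [e3, decide_eq_true_eq]; exact fun h => h hP)]
    simp only [List.map_cons, List.map_nil]
    rw [e1]
  · rw [if_neg hP, if_pos (by rw [e3, decide_eq_true_eq]; exact hP)]
    simp only [List.map_cons, List.map_nil]
    rw [e1]

theorem main_eq (lines : List String) : expand_lines lines = expand_lines_alt lines := by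
  rcases hn : mlen (lines.map String.toList) with _ | k
  · -- width 0: both sides are []
    have hz := pyZip_eq (lines.map String.toList)
    rw [hn] at hz
    simp only [expand_lines, expand_lines_alt, hz]
    simp [pyExpandOneWay, pyZip, pyZipAux]
  · have hC := pyZip_eq (lines.map String.toList)
    rw [hn] at hC
    have hrne : lines ≠ [] := by
      intro h0; rw [h0] at hn; simp [mlen] at hn
    have hmemcols : ∀ l ∈ pyExpandOneWay (pyZip (lines.map String.toList)),
        l.length = lines.length := by
      intro l hl
      rw [pyExpandOneWay] at hl
      obtain ⟨c, hc, hlc⟩ := List.mem_flatMap.mp hl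
      have hlceq : l = c := by split at hlc <;> simp at hlc <;> tauto
      subst hlceq
      rw [hC] at hc
      obtain ⟨i, hi, rfl⟩ := List.mem_map.mp hc
      simp
    have hcolsne : pyExpandOneWay (pyZip (lines.map String.toList)) ≠ [] := by
      rw [pyExpandOneWay, hC]
      intro h0
      rw [List.flatMap_eq_nil_iff] at h0
      have hmem : (lines.map String.toList).map (fun r => r.getD 0 ' ') ∈
          (List.range (k + 1)).map (fun i => (lines.map String.toList).map (fun r => r.getD i ' ')) :=
        List.mem_map.mpr ⟨0, by simp, rfl⟩
      have := h0 _ hmem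
      split at this <;> simp at this
    have hm : mlen (pyExpandOneWay (pyZip (lines.map String.toList))) = lines.length := by
      have := mlen_const _ lines.length hcolsne hmemcols
      simpa using this
    have hZ2 := pyZip_eq (pyExpandOneWay (pyZip (lines.map String.toList)))
    rw [hm] at hZ2
    have hcne : ¬ (pyZip (lines.map String.toList)).isEmpty := by
      rw [hC]; simp
    rw [expand_lines, hZ2]
    simp only [expand_lines_alt]
    rw [if_neg (by simpa using hcne)]
    rw [foldr_step]
    rw [pyExpandOneWay, List.flatMap_map, List.map_flatMap]
    have hlen : lines.length = (lines.map String.toList).length := by simp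
    rw [hlen]
    apply flatMap_range_index
    intro j hj
    have hj' : j < lines.length := by simpa using hj
    have hget : (lines.map String.toList)[j] = lines[j].toList := by simp
    rw [hget]
    have hrow := row_agree lines k hn j hj'
    rw [hrow]
    rw [apply_ite (List.map (fun l => String.mk l))]
    simp only [List.map_cons, List.map_nil]

-- ===== VERDICT (by name: the statement is the Claim_ definition above) =====
theorem expand_lines_spec : Claim_equal_expand_lines := by
  intro lines _
  unfold Spec_expand_lines
  exact main_eq lines
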